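-- pv_equiv track=rewrite | github.com/eddyswens/FlyTris | main.py | scaleMat
-- ===== SOURCE A (Python) =====
-- def create_mat(row, cols):
--     return [[0 for x in range(cols)] for x in range(row)]
--
-- def scaleMat(mat):
--     rows = len(mat)
--     cols = len(mat[0])
--     scaledMat = create_mat(rows*2, cols*2)
--     for row in range(rows):
--         for col in range(cols):
--             val = mat[row][col]
--             scaledMat[2*row][2*col] = val
--             scaledMat[2*row+1][2*col] = val
--             scaledMat[2*row][2*col+1] = val
--             scaledMat[2*row+1][2*col+1] = val
--     return scaledMat
-- ===== SOURCE B (Python) =====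
-- def scaleMat(mat):
--     rows = len(mat)
--     cols = len(mat[0])
--     out = []
--     for r in range(rows):
--         doubled = [mat[r][c] for c in range(cols) for _ in range(2)]
--         out.append(doubled)
--         out.append(list(doubled))
--     return out
-- ===== Notes on version B (the rewrite author's own statement) =====
-- stated objective: simpler
-- what changed: Instead of pre-allocating a 2rows x 2cols zero matrix and writing each value into four cells by index, B builds each horizontally-doubled row once as a comprehension and appends it (and a copy) twice, so no mutable grid or index arithmetic is needed.
import Mathlib
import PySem

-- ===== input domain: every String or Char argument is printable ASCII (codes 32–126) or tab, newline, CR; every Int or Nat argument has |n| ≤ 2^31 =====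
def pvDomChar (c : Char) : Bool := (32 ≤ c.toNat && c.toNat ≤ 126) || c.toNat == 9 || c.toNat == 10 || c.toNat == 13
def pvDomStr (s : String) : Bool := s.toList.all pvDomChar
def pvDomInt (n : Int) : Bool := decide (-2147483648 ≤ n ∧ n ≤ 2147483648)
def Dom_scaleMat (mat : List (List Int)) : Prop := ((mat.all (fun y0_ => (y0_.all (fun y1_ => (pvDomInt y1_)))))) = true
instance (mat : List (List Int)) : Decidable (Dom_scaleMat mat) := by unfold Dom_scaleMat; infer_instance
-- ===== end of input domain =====

-- B replaces A's pre-allocated zero matrix and quadruple in-place cell writes by directly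
-- building each horizontally-doubled row once and emitting it twice (simpler decomposition).

-- ===== PORT A =====
-- helper create_mat of A
def createMat (row : Int) (cols : Int) : List (List Int) :=
  (PySem.List.pyRange 0 row 1).map (fun _ => (PySem.List.pyRange 0 cols 1).map (fun _ => (0 : Int)))

-- 'm[i][j] = v'; exact for 0 ≤ i < len m, 0 ≤ j < len m[i] (Pre_ keeps all indices in that range)
def pySet2 (m : List (List Int)) (i j : Int) (v : Int) : List (List Int) :=
  m.modify i.toNat (fun w => w.set j.toNat v)

def scaleMat (mat : List (List Int)) : List (List Int) :=
  let rows : Int := PySem.List.len mat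
  let cols : Int := PySem.List.len (PySem.List.pyGetD mat 0 [])
  let scaledMat := createMat (rows * 2) (cols * 2)
  (PySem.List.pyRange 0 rows 1).foldl (fun sm row =>
    (PySem.List.pyRange 0 cols 1).foldl (fun sm col =>
      let val := PySem.List.pyGetD (PySem.List.pyGetD mat row []) col 0
      let sm := pySet2 sm (2 * row) (2 * col) val
      let sm := pySet2 sm (2 * row + 1) (2 * col) val
      let sm := pySet2 sm (2 * row) (2 * col + 1) val
      pySet2 sm (2 * row + 1) (2 * col + 1) val) sm) scaledMat

-- ===== PORT B =====
def scaleMat_alt (mat : List (List Int)) : List (List Int) :=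
  let rows : Int := PySem.List.len mat
  let cols : Int := PySem.List.len (PySem.List.pyGetD mat 0 [])
  (PySem.List.pyRange 0 rows 1).foldl (fun out r =>
    let row := PySem.List.pyGetD mat r []
    let doubled := (PySem.List.pyRange 0 cols 1).flatMap (fun c =>
      let v := PySem.List.pyGetD row c 0
      [v, v])
    out ++ [doubled, doubled]) []

-- ===== PRECONDITION & SPEC =====
-- Pre_ excludes exactly the inputs where Python A raises IndexError (B raises there too):
-- the empty matrix (mat[0]) and matrices with a row shorter than the first row (mat[row][col]).
def Pre_scaleMat (mat : List (List Int)) : Prop :=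
  mat ≠ [] ∧ ∀ row ∈ mat, (mat.headD []).length ≤ row.length
instance (mat : List (List Int)) : Decidable (Pre_scaleMat mat) := by unfold Pre_scaleMat; infer_instance

def pvWitness_scaleMat : List (List Int) := [[1, 2], [3, 4]]

def Spec_scaleMat (mat : List (List Int)) (out : List (List Int)) : Prop := out = scaleMat_alt mat
instance (mat : List (List Int)) (out : List (List Int)) : Decidable (Spec_scaleMat mat out) := by unfold Spec_scaleMat; infer_instance

-- ===== CLAIM (what is proved, stated in full; the proofs are below) =====
def Claim_equal_scaleMat : Prop := ∀ (mat : List (List Int)), Dom_scaleMat mat → Pre_scaleMat mat → Spec_scaleMat mat (scaleMat mat)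

-- ===== LEMMAS AND PROOFS =====

-- each value doubled horizontally
def dub (row : List Int) : List Int := row.flatMap (fun v => [v, v])

-- the (Nat-indexed) body of A's inner loop: the four cell writes for source cell (a, c)
def qstep (row : List Int) (a : Nat) (sm : List (List Int)) (c : Nat) : List (List Int) :=
  ((((sm.modify (2 * a) (fun w => w.set (2 * c) (row.getD c 0))).modify
      (2 * a + 1) (fun w => w.set (2 * c) (row.getD c 0))).modify
      (2 * a) (fun w => w.set (2 * c + 1) (row.getD c 0))).modify
      (2 * a + 1) (fun w => w.set (2 * c + 1) (row.getD c 0)))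

lemma dub_append (l₁ l₂ : List Int) : dub (l₁ ++ l₂) = dub l₁ ++ dub l₂ := by
  simp [dub]

lemma dub_length (l : List Int) : (dub l).length = 2 * l.length := by
  induction l with
  | nil => simp [dub]
  | cons x xs ih => simp [dub] at ih ⊢; omega

lemma set_offset (p t : List Int) (j : Nat) (v : Int) :
    (p ++ t).set (p.length + j) v = p ++ t.set j v := by
  simp

lemma modify_offset {α : Type} (p t : List α) (j : Nat) (f : α → α) :
    (p ++ t).modify (p.length + j) f = p ++ t.modify j f := by
  induction p with
  | nil => simp
  | cons x xs ih => simpa [Nat.succ_add] using ih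

lemma modify_at_two {α : Type} (p : List α) (x y : α) (r : List α) (f : α → α) (h : Nat)
    (hh : h = p.length) :
    ((p ++ x :: y :: r).modify h f = p ++ f x :: y :: r) ∧
    ((p ++ x :: y :: r).modify (h + 1) f = p ++ x :: f y :: r) := by
  subst hh
  constructor
  · simpa using modify_offset p (x :: y :: r) 0 f
  · simpa using modify_offset p (x :: y :: r) 1 f

-- after m inner-loop steps the two target rows hold the doubled m-prefix, zeros beyond
lemma inner_inv (row : List Int) (M : Nat) (hM : M ≤ row.length) (a : Nat)
    (pre rest : List (List Int)) (hpre : pre.length = 2 * a) :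
    ∀ m, m ≤ M →
      (List.range m).foldl (qstep row a) (pre ++ (List.replicate (2 * M) 0) :: (List.replicate (2 * M) 0) :: rest)
        = pre ++ (dub (row.take m) ++ List.replicate (2 * (M - m)) 0) ::
                 (dub (row.take m) ++ List.replicate (2 * (M - m)) 0) :: rest := by
  intro m hm
  induction m with
  | zero => simp [dub]
  | succ m ih =>
    rw [List.range_succ, List.foldl_append, ih (by omega)]
    set P := dub (row.take m) ++ List.replicate (2 * (M - m)) 0 with hP
    have hlenP : (dub (row.take m)).length = 2 * m := by
      rw [dub_length, List.length_take]; omega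
    have hrepl : List.replicate (2 * (M - m)) (0 : Int)
        = 0 :: 0 :: List.replicate (2 * (M - (m + 1))) 0 := by
      have : 2 * (M - m) = 2 * (M - (m + 1)) + 1 + 1 := by omega
      rw [this, List.replicate_succ, List.replicate_succ]
    have hsets : ∀ v : Int, ((P.set (2 * m) v).set (2 * m + 1) v)
        = dub (row.take m) ++ v :: v :: List.replicate (2 * (M - (m + 1))) 0 := by
      intro v
      rw [hP, hrepl]
      have h0 : 2 * m = (dub (row.take m)).length + 0 := by omega
      rw [h0, set_offset]
      simp only [List.set_cons_zero, Nat.add_zero]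
      rw [set_offset]
      rfl
    have hv : row.getD m 0 = row[m]'(by omega) := by
      rw [List.getD_eq_getElem?_getD, List.getElem?_eq_getElem (by omega)]; rfl
    have htake : row.take (m + 1) = row.take m ++ [row[m]'(by omega)] := by
      rw [List.take_add_one, List.getElem?_eq_getElem (by omega)]; rfl
    -- now execute the four writes of qstep
    simp only [List.foldl_cons, List.foldl_nil, qstep]
    set v := row.getD m 0 with hvdef
    have e1 := (modify_at_two pre P P rest (fun w => w.set (2 * m) v) (2 * a) hpre.symm).1
    rw [e1]
    have e2 := (modify_at_two pre (P.set (2 * m) v) P rest (fun w => w.set (2 * m) v) (2 * a) hpre.symm).2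
    rw [e2]
    have e3 := (modify_at_two pre (P.set (2 * m) v) (P.set (2 * m) v) rest
        (fun w => w.set (2 * m + 1) v) (2 * a) hpre.symm).1
    rw [e3]
    have e4 := (modify_at_two pre ((P.set (2 * m) v).set (2 * m + 1) v) (P.set (2 * m) v) rest
        (fun w => w.set (2 * m + 1) v) (2 * a) hpre.symm).2
    rw [e4]
    rw [hsets v, htake, dub_append]
    have hg : row[m]? = some (row[m]'(by omega)) := List.getElem?_eq_getElem (by omega)
    simp [dub, hvdef, hg]

-- the outer loop turns pairs of zero rows into pairs of doubled rows, front to back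
lemma outer_inv (mat : List (List Int)) (M : Nat) :
    ∀ (tail : List (List Int)) (s : Nat) (pre : List (List Int)),
      mat.drop s = tail → (∀ row ∈ tail, M ≤ row.length) → pre.length = 2 * s →
      (List.range' s tail.length).foldl
          (fun sm r => (List.range M).foldl (qstep (mat.getD r []) r) sm)
          (pre ++ List.replicate (2 * tail.length) (List.replicate (2 * M) 0))
        = pre ++ tail.flatMap (fun row => [dub (row.take M), dub (row.take M)]) := by
  intro tail
  induction tail with
  | nil => intro s pre _ _ _; simp
  | cons row tl ih =>
    intro s pre hdrop htail hpre
    have hrow : mat.getD s [] = row := by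
      have h1 : mat[s]? = some row := by
        rw [← List.head?_drop, hdrop]; rfl
      rw [List.getD_eq_getElem?_getD, h1]; rfl
    have hrepl : List.replicate (2 * (tl.length + 1)) (List.replicate (2 * M) (0 : Int))
        = (List.replicate (2 * M) 0) :: (List.replicate (2 * M) 0) :: List.replicate (2 * tl.length) (List.replicate (2 * M) 0) := by
      have : 2 * (tl.length + 1) = 2 * tl.length + 1 + 1 := by omega
      rw [this, List.replicate_succ, List.replicate_succ]
    rw [List.length_cons, List.range'_succ, List.foldl_cons, hrepl, hrow]
    have hMrow : M ≤ row.length := htail row (by simp)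
    have hin := inner_inv row M hMrow s pre (List.replicate (2 * tl.length) (List.replicate (2 * M) 0)) hpre M (le_refl M)
    rw [hin]
    have htaketake : row.take M ++ List.replicate (2 * (M - M)) (0 : Int) = row.take M := by simp
    simp only [Nat.sub_self, Nat.mul_zero, List.replicate_zero, List.append_nil]
    have hrec := ih (s + 1) (pre ++ [dub (row.take M), dub (row.take M)])
      (by rw [← List.drop_drop, hdrop]; rfl)
      (fun r hr => htail r (by simp [hr]))
      (by simp [hpre]; omega)
    rw [List.append_assoc] at hrec
    rw [List.flatMap_cons, ← List.append_assoc]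
    exact hrec

lemma range_dub (row : List Int) : ∀ m, m ≤ row.length →
    (List.range m).flatMap (fun c => [row.getD c 0, row.getD c 0]) = dub (row.take m) := by
  intro m hm
  induction m with
  | zero => simp [dub]
  | succ m ih =>
    rw [List.range_succ, List.flatMap_append, ih (by omega)]
    have hv : row.getD m 0 = row[m]'(by omega) := by
      rw [List.getD_eq_getElem?_getD, List.getElem?_eq_getElem (by omega)]; rfl
    have htake : row.take (m + 1) = row.take m ++ [row[m]'(by omega)] := by
      rw [List.take_add_one, List.getElem?_eq_getElem (by omega)]; rfl
    rw [htake, dub_append]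
    have hg : row[m]? = some (row[m]'(by omega)) := List.getElem?_eq_getElem (by omega)
    simp [dub, hg]

-- canonical value shared by both ports
lemma flatMap_pyRange_getD {α β : Type} (xs : List α) (d : α) (g : α → List β) :
    (PySem.List.pyRange 0 (xs.length : Int) 1).flatMap (fun j => g (PySem.List.pyGetD xs j d))
      = xs.flatMap g := by
  conv_rhs => rw [← PySem.List.map_pyGetD_pyRange_zero' xs d]
  rw [List.flatMap_map]

lemma alt_eq_canon (mat : List (List Int)) (hpre : Pre_scaleMat mat) :
    scaleMat_alt mat
      = mat.flatMap (fun row => [dub (row.take (mat.headD []).length), dub (row.take (mat.headD []).length)]) := by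
  obtain ⟨hne, hlen⟩ := hpre
  have h0 : PySem.List.pyGetD mat 0 [] = mat.headD [] := by
    cases mat with
    | nil => rfl
    | cons h t => simp
  have hdbl : ∀ row : List Int, (mat.headD []).length ≤ row.length →
      (PySem.List.pyRange 0 ((mat.headD []).length : Int) 1).flatMap
          (fun c => [PySem.List.pyGetD row c 0, PySem.List.pyGetD row c 0])
        = dub (row.take (mat.headD []).length) := by
    intro row hr
    rw [PySem.List.pyRange_zero_nat, List.flatMap_map]
    simp only [PySem.List.pyGetD_natCast]
    exact range_dub row (mat.headD []).length hr
  simp only [scaleMat_alt, PySem.List.len_eq, h0]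
  rw [PySem.List.foldl_append_eq_flatMap, List.nil_append]
  have h1 := flatMap_pyRange_getD mat []
      (fun row => [(PySem.List.pyRange 0 ((mat.headD []).length : Int) 1).flatMap
          (fun c => [PySem.List.pyGetD row c 0, PySem.List.pyGetD row c 0]),
        (PySem.List.pyRange 0 ((mat.headD []).length : Int) 1).flatMap
          (fun c => [PySem.List.pyGetD row c 0, PySem.List.pyGetD row c 0])])
  have h2 : mat.flatMap
      (fun row => [(PySem.List.pyRange 0 ((mat.headD []).length : Int) 1).flatMap
          (fun c => [PySem.List.pyGetD row c 0, PySem.List.pyGetD row c 0]),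
        (PySem.List.pyRange 0 ((mat.headD []).length : Int) 1).flatMap
          (fun c => [PySem.List.pyGetD row c 0, PySem.List.pyGetD row c 0])])
      = mat.flatMap (fun row => [dub (row.take (mat.headD []).length), dub (row.take (mat.headD []).length)]) :=
    List.flatMap_congr (fun row hrow => by rw [hdbl row (hlen row hrow)])
  exact h1.trans h2

lemma a_eq_canon (mat : List (List Int)) (hpre : Pre_scaleMat mat) :
    scaleMat mat
      = mat.flatMap (fun row => [dub (row.take (mat.headD []).length), dub (row.take (mat.headD []).length)]) := by
  obtain ⟨hne, hlen⟩ := hpre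
  have h0 : PySem.List.pyGetD mat 0 [] = mat.headD [] := by
    cases mat with
    | nil => rfl
    | cons h t => simp
  have hcast1 : ((mat.length : Int)) * 2 = ((2 * mat.length : Nat) : Int) := by push_cast; ring
  have hcast2 : (((mat.headD []).length : Int)) * 2 = ((2 * (mat.headD []).length : Nat) : Int) := by
    push_cast; ring
  have t1 : ∀ k : Nat, ((2 : Int) * (k : Int)).toNat = 2 * k := by intro k; omega
  have t2 : ∀ k : Nat, ((2 : Int) * (k : Int) + 1).toNat = 2 * k + 1 := by intro k; omega
  simp only [scaleMat, createMat, PySem.List.len_eq, h0, hcast1, hcast2,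
    PySem.List.pyRange_zero_nat, List.map_const', List.foldl_map,
    pySet2, PySem.List.pyGetD_natCast, t1, t2]
  have := outer_inv mat (mat.headD []).length mat 0 [] rfl hlen rfl
  rw [← List.range_eq_range'] at this
  simpa [qstep, List.getD_eq_getElem?_getD] using this

-- ===== VERDICT (by name: the statement is the Claim_ definition above) =====
theorem scaleMat_spec : Claim_equal_scaleMat := by
  intro mat _ hpre
  unfold Spec_scaleMat
  rw [a_eq_canon mat hpre, alt_eq_canon mat hpre]
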